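-- pv_equiv track=rewrite | github.com/ZKemstedt/adventofcode2020 | day9/day9.py | numbersThatStartsSumTo
-- ===== SOURCE A (Python) =====
-- def numbersThatStartsSumTo(target: int, remaining: list[int], soFar: list[int]) -> list[int]:
--     if not remaining:
--         return []
--
--     head = remaining[0]
--     tail = remaining[1:]
--
--     if head == target:
--         return soFar + [head]
--
--     return numbersThatStartsSumTo(target - head, tail, soFar + [head])
-- ===== SOURCE B (Python) =====
-- def numbersThatStartsSumTo(target: int, remaining: list[int], soFar: list[int]) -> list[int]:
--     out = list(soFar)
--     acc = 0
--     for x in remaining: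
--         acc += x
--         out.append(x)
--         if acc == target:
--             return out
--     return []
-- ===== Notes on version B (the rewrite author's own statement) =====
-- stated objective: faster
-- what changed: Replaces the recursion that re-slices the tail and rebuilds soFar+[head] at every step with a single iterative pass keeping a running sum and one output list appended in place.
import Mathlib
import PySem

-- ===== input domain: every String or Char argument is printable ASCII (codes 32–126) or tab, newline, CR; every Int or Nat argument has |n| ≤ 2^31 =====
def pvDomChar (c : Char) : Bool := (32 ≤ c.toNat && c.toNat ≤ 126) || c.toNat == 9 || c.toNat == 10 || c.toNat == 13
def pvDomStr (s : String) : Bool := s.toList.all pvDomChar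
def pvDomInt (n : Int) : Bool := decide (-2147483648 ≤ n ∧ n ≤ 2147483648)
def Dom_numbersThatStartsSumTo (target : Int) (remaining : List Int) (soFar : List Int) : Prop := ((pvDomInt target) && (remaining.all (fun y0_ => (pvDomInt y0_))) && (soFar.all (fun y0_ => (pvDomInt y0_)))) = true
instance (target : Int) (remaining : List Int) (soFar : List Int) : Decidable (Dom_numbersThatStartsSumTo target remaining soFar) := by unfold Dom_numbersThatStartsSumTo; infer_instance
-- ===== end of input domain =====

-- ===== PORT A =====
def numbersThatStartsSumTo (target : Int) (remaining : List Int) (soFar : List Int) : List Int :=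
  match remaining with
  | [] => []
  | head :: tail =>
    if head = target then soFar ++ [head]
    else numbersThatStartsSumTo (target - head) tail (soFar ++ [head])

-- ===== PORT B =====
-- B: one iterative pass with a running sum `acc` and one output list; no slicing, no subtraction of target.
def pvAltLoop (target : Int) (xs : List Int) (acc : Int) (out : List Int) : List Int :=
  match xs with
  | [] => []
  | x :: rest =>
    if acc + x = target then out ++ [x]
    else pvAltLoop target rest (acc + x) (out ++ [x])

def numbersThatStartsSumTo_alt (target : Int) (remaining : List Int) (soFar : List Int) : List Int :=
  pvAltLoop target remaining 0 soFar

-- ===== PRECONDITION & SPEC =====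
def Spec_numbersThatStartsSumTo (target : Int) (remaining : List Int) (soFar : List Int) (out : List Int) : Prop := out = numbersThatStartsSumTo_alt target remaining soFar
instance (target : Int) (remaining : List Int) (soFar : List Int) (out : List Int) : Decidable (Spec_numbersThatStartsSumTo target remaining soFar out) := by unfold Spec_numbersThatStartsSumTo; infer_instance

-- ===== CLAIM (what is proved, stated in full; the proofs are below) =====
def Claim_equal_numbersThatStartsSumTo : Prop := ∀ (target : Int) (remaining : List Int) (soFar : List Int), Dom_numbersThatStartsSumTo target remaining soFar → Spec_numbersThatStartsSumTo target remaining soFar (numbersThatStartsSumTo target remaining soFar)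

-- ===== LEMMAS AND PROOFS =====

lemma pvAltLoop_eq_A (target : Int) (xs : List Int) : ∀ (acc : Int) (out : List Int),
    pvAltLoop target xs acc out = numbersThatStartsSumTo (target - acc) xs out := by
  induction xs with
  | nil => intro acc out; rfl
  | cons x rest ih =>
    intro acc out
    simp only [pvAltLoop, numbersThatStartsSumTo]
    by_cases h : acc + x = target
    · rw [if_pos h, if_pos (by omega)]
    · rw [if_neg h, if_neg (by omega), ih]
      congr 1
      omega

-- ===== VERDICT (by name: the statement is the Claim_ definition above) =====
theorem numbersThatStartsSumTo_spec : Claim_equal_numbersThatStartsSumTo := by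
  intro target remaining soFar _
  show numbersThatStartsSumTo target remaining soFar = _
  rw [numbersThatStartsSumTo_alt, pvAltLoop_eq_A]
  norm_num
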